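-- pv_equiv track=rewrite | github.com/kzhangmyang-cmyk/Xpoliceclaw | generate_architecture_site.py | count_js_array_entries
-- ===== SOURCE A (Python) =====
-- def count_js_array_entries(lines: list[str], const_name: str) -> int:
--     count = 0
--     in_block = False
--     opener = f"const {const_name} = ["
--     for line in lines:
--         stripped = line.strip()
--         if stripped.startswith(opener):
--             in_block = True
--             continue
--         if in_block and stripped == "];":
--             break
--         if in_block and stripped.startswith("{ id:"):
--             count += 1
--     return count
-- ===== SOURCE B (Python) =====
-- def count_js_array_entries(lines: list[str], const_name: str) -> int:
--     opener = f"const {const_name} = ["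
--     stripped = [ln.strip() for ln in lines]
--     opens = [i for i, s in enumerate(stripped) if s.startswith(opener)]
--     if not opens:
--         return 0
--     start = opens[0]
--     ends = [i for i, s in enumerate(stripped) if s == "];" and i > start]
--     stop = ends[0] if ends else len(stripped)
--     ids = [i for i, s in enumerate(stripped) if s.startswith("{ id:")]
--     return len([i for i in ids if start < i < stop])
-- ===== Notes on version B (the rewrite author's own statement) =====
-- stated objective: alternative
-- what changed: Instead of A's single stateful scan with an in_block flag, B precomputes three index lists with enumerate (opener positions, terminator positions after the opener, id-line positions) and derives the count by pure index arithmetic: it counts id positions strictly between the first opener index and the first terminator index after it.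
import Mathlib
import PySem

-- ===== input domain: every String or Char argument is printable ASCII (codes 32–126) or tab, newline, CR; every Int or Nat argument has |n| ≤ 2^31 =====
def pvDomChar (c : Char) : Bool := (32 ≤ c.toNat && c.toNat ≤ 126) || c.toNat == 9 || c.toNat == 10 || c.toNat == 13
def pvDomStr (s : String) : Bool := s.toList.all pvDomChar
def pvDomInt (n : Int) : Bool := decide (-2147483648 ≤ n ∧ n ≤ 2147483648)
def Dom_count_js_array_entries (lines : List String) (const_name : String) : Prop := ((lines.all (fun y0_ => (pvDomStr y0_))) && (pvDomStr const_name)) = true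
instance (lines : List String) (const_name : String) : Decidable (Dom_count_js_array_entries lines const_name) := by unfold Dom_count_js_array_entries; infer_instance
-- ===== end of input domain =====

-- B replaces A's stateful flag-driven scan by three precomputed index lists (opener / terminator / id-line positions) and pure index arithmetic on them (objective: alternative).

-- ===== PORT A =====
-- the for-loop of A with its state (count, in_block); `break` returns count
def pvALoop (opener : String) : List String → Int → Bool → Int
  | [], count, _ => count
  | l :: rest, count, inb =>
    let stripped := PySem.Str.strip l
    if PySem.Str.startswith stripped opener then pvALoop opener rest count true
    else if inb && (stripped == "];") then count
    else if inb && PySem.Str.startswith stripped "{ id:" then pvALoop opener rest (count + 1) inb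
    else pvALoop opener rest count inb

def count_js_array_entries (lines : List String) (const_name : String) : Int :=
  pvALoop ("const " ++ const_name ++ " = [") lines 0 false

-- ===== PORT B =====
-- three index lists built by enumerate+filter; `opens[0]`/`ends[0] if ends else len` become headD on a list known/defaulted
def count_js_array_entries_alt (lines : List String) (const_name : String) : Int :=
  let opener := "const " ++ const_name ++ " = ["
  let stripped := lines.map PySem.Str.strip
  let opens := ((PySem.List.enumerate stripped).filter (fun p => PySem.Str.startswith p.2 opener)).map (fun p => p.1)
  if opens.isEmpty then 0
  else
    let start : Int := opens.headD 0
    let ends := ((PySem.List.enumerate stripped).filter (fun p => p.2 == "];" && decide (start < p.1))).map (fun p => p.1)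
    let stop := ends.headD (stripped.length : Int)
    let ids := ((PySem.List.enumerate stripped).filter (fun p => PySem.Str.startswith p.2 "{ id:")).map (fun p => p.1)
    ((ids.filter (fun i => decide (start < i) && decide (i < stop))).length : Int)

-- ===== PRECONDITION & SPEC =====
def Spec_count_js_array_entries (lines : List String) (const_name : String) (out : Int) : Prop := out = count_js_array_entries_alt lines const_name
instance (lines : List String) (const_name : String) (out : Int) : Decidable (Spec_count_js_array_entries lines const_name out) := by unfold Spec_count_js_array_entries; infer_instance

-- ===== CLAIM (what is proved, stated in full; the proofs are below) =====
def Claim_equal_count_js_array_entries : Prop := ∀ (lines : List String) (const_name : String), Dom_count_js_array_entries lines const_name → Spec_count_js_array_entries lines const_name (count_js_array_entries lines const_name)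

-- ===== LEMMAS AND PROOFS =====

-- proof-only middle form: locate the opener, then count id-lines up to "];"
def pvBCount : List String → Int
  | [] => 0
  | s :: rest =>
    if s == "];" then 0
    else if PySem.Str.startswith s "{ id:" then 1 + pvBCount rest
    else pvBCount rest

def pvMid (lines : List String) (const_name : String) : Int :=
  let stripped := lines.map PySem.Str.strip
  match stripped.findIdx? (fun s => PySem.Str.startswith s ("const " ++ const_name ++ " = [")) with
  | none => 0
  | some start => pvBCount (stripped.drop (start + 1))

-- a line starting with the opener starts with 'c', so it is neither "];" nor a "{ id:" line
theorem pv_opener_head {s name : String}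
    (h : PySem.Str.startswith s ("const " ++ name ++ " = [") = true) :
    (s == "];") = false ∧ PySem.Str.startswith s "{ id:" = false := by
  simp only [PySem.Str.startswith_eq, PySem.Chars.startswith_iff, String.toList_append] at h
  obtain ⟨t, ht⟩ := h
  constructor
  · rw [beq_eq_false_iff_ne]
    rintro rfl
    simp at ht
  · rw [Bool.eq_false_iff]
    intro hp
    rw [PySem.Str.startswith_eq, PySem.Chars.startswith_iff] at hp
    obtain ⟨u, hu⟩ := hp
    have h2 := ht.trans hu.symm
    simp at h2

theorem pv_aLoop_inblock (name : String) (rest : List String) (count : Int) :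
    pvALoop ("const " ++ name ++ " = [") rest count true
      = count + pvBCount (rest.map PySem.Str.strip) := by
  induction rest generalizing count with
  | nil => simp [pvALoop, pvBCount]
  | cons l rest ih =>
    simp only [pvALoop, List.map_cons, pvBCount, Bool.true_and]
    by_cases hop : PySem.Str.startswith (PySem.Str.strip l) ("const " ++ name ++ " = [") = true
    · obtain ⟨h1, h2⟩ := pv_opener_head hop
      rw [if_pos hop, if_neg (by simp [h1]), if_neg (by rw [h2]; exact Bool.false_ne_true)]
      exact ih count
    · rw [if_neg hop]
      by_cases hend : (PySem.Str.strip l == "];") = true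
      · rw [if_pos hend, if_pos hend]
        omega
      · rw [if_neg hend, if_neg hend]
        by_cases hid : PySem.Str.startswith (PySem.Str.strip l) "{ id:" = true
        · rw [if_pos hid, if_pos hid, ih]
          omega
        · rw [if_neg hid, if_neg hid]
          exact ih count

theorem pv_mid_cons (l : String) (rest : List String) (name : String) :
    pvMid (l :: rest) name
      = if PySem.Str.startswith (PySem.Str.strip l) ("const " ++ name ++ " = [") = true
        then pvBCount (rest.map PySem.Str.strip)
        else pvMid rest name := by
  simp only [pvMid, List.map_cons, List.findIdx?_cons]
  by_cases hop : PySem.Str.startswith (PySem.Str.strip l) ("const " ++ name ++ " = [") = true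
  · rw [if_pos hop, if_pos hop]
    simp
  · rw [if_neg hop, if_neg hop]
    cases h : (rest.map PySem.Str.strip).findIdx?
        (fun s => PySem.Str.startswith s ("const " ++ name ++ " = [")) with
    | none => simp
    | some i => simp [List.drop_succ_cons]

theorem pv_a_eq_mid (lines : List String) (name : String) :
    count_js_array_entries lines name = pvMid lines name := by
  induction lines with
  | nil => simp [count_js_array_entries, pvALoop, pvMid]
  | cons l rest ih =>
    rw [pv_mid_cons]
    simp only [count_js_array_entries, pvALoop, Bool.false_and, Bool.false_eq_true,
      if_false] at ih ⊢
    by_cases hop : PySem.Str.startswith (PySem.Str.strip l) ("const " ++ name ++ " = [") = true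
    · rw [if_pos hop, if_pos hop]
      simpa using pv_aLoop_inblock name rest 0
    · rw [if_neg hop, if_neg hop]
      exact ih

-- ----- B side: relating the index lists to the middle form -----

-- indices produced by enumerate are at least the starting offset
theorem pv_enum_ge {α : Type} {L : List α} {s : Int} {p : Int × α}
    (h : p ∈ PySem.List.enumerate L s) : s ≤ p.1 := by
  rw [PySem.List.mem_enumerate_iff] at h
  obtain ⟨k, hk, rfl⟩ := h
  simp

-- head of a filtered enumerate's index list = findIdx?
theorem pv_head_opens {α : Type} (q : α → Bool) (L : List α) (s : Int) :
    (((PySem.List.enumerate L s).filter (fun p => q p.2)).map (fun p => p.1)).head?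
      = (L.findIdx? q).map (fun k => s + (k : Int)) := by
  induction L generalizing s with
  | nil => simp [PySem.List.enumerate_nil]
  | cons x xs ih =>
    rw [PySem.List.enumerate_cons, List.findIdx?_cons]
    by_cases hx : q x = true
    · simp [hx]
    · rw [List.filter_cons_of_neg (by simpa using hx), if_neg hx, ih]
      cases xs.findIdx? q with
      | none => simp
      | some j => simp; omega

-- findIdx? = none means the opens list is empty
theorem pv_opens_nil {α : Type} (q : α → Bool) (L : List α)
    (h : L.findIdx? q = none) :
    ((PySem.List.enumerate L 0).filter (fun p => q p.2)).map (fun p => p.1) = [] := by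
  rw [List.map_eq_nil_iff, List.filter_eq_nil_iff]
  intro p hp
  rw [PySem.List.mem_enumerate_iff] at hp
  obtain ⟨k, hk, rfl⟩ := hp
  rw [List.findIdx?_eq_none_iff] at h
  simpa using h _ (List.getElem_mem hk)

-- splitting a `start < index` filter at position k
theorem pv_split {α : Type} (r : Int × α → Bool) (L : List α) (k : Nat) (hk : k < L.length) :
    (PySem.List.enumerate L 0).filter (fun p => r p && decide ((k : Int) < p.1))
      = (PySem.List.enumerate (L.drop (k + 1)) ((k : Int) + 1)).filter r := by
  conv_lhs => rw [← List.take_append_drop (k + 1) L]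
  rw [PySem.List.enumerate_append, List.filter_append]
  have hlen : (L.take (k + 1)).length = k + 1 := by
    rw [List.length_take]; omega
  rw [List.filter_eq_nil_iff.mpr, List.nil_append]
  · rw [hlen]
    push_cast
    rw [zero_add]
    apply List.filter_congr
    intro p hp
    have h1 := pv_enum_ge hp
    have h2 : decide ((k : Int) < p.1) = true := by
      simp only [decide_eq_true_eq]
      omega
    rw [h2, Bool.and_true]
  · intro p hp
    rw [PySem.List.mem_enumerate_iff] at hp
    obtain ⟨j, hj, rfl⟩ := hp
    rw [hlen] at hj
    intro hcontra
    rw [Bool.and_eq_true, decide_eq_true_eq] at hcontra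
    have := hcontra.2
    simp at this
    omega

-- the stop position of the middle form, as an index
def pvStop (M : List String) (s : Int) : Int :=
  ((((PySem.List.enumerate M s).filter (fun p => p.2 == "];")).map (fun p => p.1)).headD (s + M.length))

theorem pv_stop_ge (M : List String) (s : Int) : s ≤ pvStop M s := by
  unfold pvStop
  cases h : (((PySem.List.enumerate M s).filter (fun p => p.2 == "];")).map (fun p => p.1)) with
  | nil => simp
  | cons e t =>
    have he : e ∈ ((PySem.List.enumerate M s).filter (fun p => p.2 == "];")).map (fun p => p.1) := by
      rw [h]; exact List.mem_cons_self
    simp only [List.mem_map, List.mem_filter] at he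
    obtain ⟨p, ⟨hp, _⟩, rfl⟩ := he
    simpa using pv_enum_ge hp

theorem pv_stop_cons_end (x : String) (M : List String) (s : Int) (hx : (x == "];") = true) :
    pvStop (x :: M) s = s := by
  unfold pvStop
  rw [PySem.List.enumerate_cons, List.filter_cons_of_pos (by simpa using hx)]
  simp

theorem pv_stop_cons_ne (x : String) (M : List String) (s : Int) (hx : (x == "];") = false) :
    pvStop (x :: M) s = pvStop M (s + 1) := by
  unfold pvStop
  rw [PySem.List.enumerate_cons, List.filter_cons_of_neg (by simp [hx])]
  cases ((PySem.List.enumerate M (s + 1)).filter (fun p => p.2 == "];")).map (fun p => p.1) with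
  | nil => simp only [List.headD_nil, List.length_cons]; push_cast; ring
  | cons e t => simp

-- counting id-lines below the stop position = pvBCount
theorem pv_core (M : List String) (s : Int) :
    ((((PySem.List.enumerate M s).filter
        (fun p => PySem.Str.startswith p.2 "{ id:" && decide (p.1 < pvStop M s))).length : Int))
      = pvBCount M := by
  induction M generalizing s with
  | nil => simp [PySem.List.enumerate_nil, pvBCount]
  | cons x M ih =>
    by_cases hx : (x == "];") = true
    · rw [pv_stop_cons_end x M s hx]
      have hnil : ((PySem.List.enumerate (x :: M) s).filter
          (fun p => PySem.Str.startswith p.2 "{ id:" && decide (p.1 < s))) = [] := by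
        rw [List.filter_eq_nil_iff]
        intro p hp
        have := pv_enum_ge hp
        intro hcontra
        rw [Bool.and_eq_true, decide_eq_true_eq] at hcontra
        omega
      rw [hnil]
      simp [pvBCount, hx]
    · have hx' : (x == "];") = false := by simpa using hx
      rw [pv_stop_cons_ne x M s hx', PySem.List.enumerate_cons]
      have hlt : s < pvStop M (s + 1) := lt_of_lt_of_le (by omega) (pv_stop_ge M (s + 1))
      rw [pvBCount, if_neg (by simp [hx'])]
      by_cases hid : PySem.Str.startswith x "{ id:" = true
      · rw [List.filter_cons_of_pos (by rw [hid]; simpa using hlt), if_pos hid]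
        rw [List.length_cons]
        push_cast
        rw [ih (s + 1)]
        omega
      · have hid' : PySem.Str.startswith x "{ id:" = false := by simpa using hid
        rw [List.filter_cons_of_neg (by rw [hid']; simp), if_neg hid]
        exact ih (s + 1)

theorem pv_b_eq_mid (lines : List String) (name : String) :
    count_js_array_entries_alt lines name = pvMid lines name := by
  simp only [count_js_array_entries_alt, pvMid]
  generalize (lines.map PySem.Str.strip) = L
  cases hf : L.findIdx? (fun s => PySem.Str.startswith s ("const " ++ name ++ " = [")) with
  | none =>
    rw [pv_opens_nil _ _ hf]
    simp
  | some k =>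
    have hhead := pv_head_opens (fun s => PySem.Str.startswith s ("const " ++ name ++ " = [")) L 0
    rw [hf] at hhead
    cases hopens : ((PySem.List.enumerate L 0).filter
        (fun p => PySem.Str.startswith p.2 ("const " ++ name ++ " = ["))).map (fun p => p.1) with
    | nil => rw [hopens] at hhead; simp at hhead
    | cons start t =>
      rw [hopens] at hhead
      simp at hhead
      subst hhead
      -- k is a valid index of L
      have hk : k < L.length := by
        have hmem : ((k : Int)) ∈ ((PySem.List.enumerate L 0).filter
            (fun p => PySem.Str.startswith p.2 ("const " ++ name ++ " = ["))).map (fun p => p.1) := by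
          rw [hopens]; exact List.mem_cons_self
        obtain ⟨p, hpf, hpk⟩ := List.mem_map.mp hmem
        have hpe := (List.mem_filter.mp hpf).1
        rw [PySem.List.mem_enumerate_iff] at hpe
        obtain ⟨j, hj, rfl⟩ := hpe
        simp at hpk
        omega
      change _ = pvBCount (L.drop (k + 1))
      rw [show List.headD (((k : Int)) :: t) 0 = ((k : Int)) from rfl]
      simp only [List.isEmpty_cons, Bool.false_eq_true, if_false]
      -- rewrite the stop default to the offset form, split the ends filter at k
      have hdef : ((L.length : Nat) : Int) = ((k : Int) + 1) + (((L.drop (k + 1)).length : Nat) : Int) := by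
        have := List.length_drop (l := L) (i := k + 1)
        omega
      rw [hdef]
      have hsplit1 := pv_split (fun p => p.2 == "];") L k hk
      beta_reduce at hsplit1
      simp only [hsplit1]
      -- fold the final index filter into the enumerate filter and split it at k
      have hcore := pv_core (L.drop (k + 1)) ((k : Int) + 1)
      unfold pvStop at hcore
      rw [← hcore]
      rw [List.filter_map, List.length_map, List.filter_filter]
      simp only [Function.comp]
      rw [List.filter_congr (l := PySem.List.enumerate L 0)
        (q := fun p => (PySem.Str.startswith p.2 "{ id:" &&
          decide (p.1 < ((((PySem.List.enumerate (L.drop (k + 1)) ((k : Int) + 1)).filter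
            (fun p => p.2 == "];")).map (fun p => p.1)).headD (((k : Int) + 1) + ((L.drop (k + 1)).length : Int)))))
          && decide ((k : Int) < p.1))
        (by
          intro p _
          beta_reduce
          cases hs : PySem.Str.startswith p.2 "{ id:" <;>
            cases hc : decide (((k : Int)) < p.1) <;>
              cases hd : decide (p.1 < ((((PySem.List.enumerate (L.drop (k + 1)) ((k : Int) + 1)).filter
                  (fun p => p.2 == "];")).map (fun p => p.1)).headD
                    (((k : Int) + 1) + ((L.drop (k + 1)).length : Int)))) <;> rfl)]
      have hsplit2 := pv_split (fun p => PySem.Str.startswith p.2 "{ id:" &&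
          decide (p.1 < ((((PySem.List.enumerate (L.drop (k + 1)) ((k : Int) + 1)).filter
            (fun p => p.2 == "];")).map (fun p => p.1)).headD (((k : Int) + 1) + ((L.drop (k + 1)).length : Int))))) L k hk
      beta_reduce at hsplit2
      simp only [hsplit2]

-- ===== VERDICT (by name: the statement is the Claim_ definition above) =====
theorem count_js_array_entries_spec : Claim_equal_count_js_array_entries :=
  fun lines const_name _ => (pv_a_eq_mid lines const_name).trans (pv_b_eq_mid lines const_name).symm
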